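-- pv_equiv track=rewrite | github.com/LYUHAERIM/CodingTest-Education | 1001/PCCP1_1.py | solution
-- ===== SOURCE A (Python) =====
-- from collections import defaultdict
--
-- def solution(input_string):
--     # 외톨이 알파벳을 알파벳순으로 이어붙여서 return해라.
--     # 없으면 'N' 리턴해라
--
--     # => 외톨이 알파벳을 구한다.
--     # => sort해라.
--
--     # => 외톨이?
--     # 소문자로만 이루어진 어떤 문자열에서,
--     # 2회 이상 나타난 알파벳이
--     # 2개 이상의 부분으로 나뉘어 있으면 외톨이 알파벳이라고 정의합니다.
--
--     # => 알파벳의 개수를 구해라! 단, 알파벳이 연속으로 존재하면 1개로 칩니다.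
--     # 즉, 우리는 문자열에서 알파벳의 덩어리의 개수를 구한다.
--     # -> 그것의 개수가 2개 이상인지를 확인.
--
--     # 알파벳 덩어리의 개수
--     counter = defaultdict(int)
--
--     before = ''
--     for char in input_string:
--         # aaaa와 같이 연속된 것은 1번만 세야 한다.
--         # 이전값과 비교해서 같으면 세지 않는다.
--         if before == char:
--             continue # 다음 반복으로 넘어가자.
--         counter[char] += 1
--         before = char
--
--     # answer = []
--     # for key, value in counter.items():
--     #     if value > 1:
--     #         answer.append(key)
--     answer = [key for key, value in counter.items() if value > 1]
--
--     if answer: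
--         answer.sort()
--         answer = "".join(answer)
--     else:
--         answer = 'N'
--     return answer
-- ===== SOURCE B (Python) =====
-- def solution(input_string):
--     # One pass: per character keep (first_index, last_index, count);
--     # a letter is lonely iff its occurrences span a gap: last-first+1 != count.
--     stats = {}
--     for i, ch in enumerate(input_string):
--         rec = stats.get(ch)
--         if rec is None:
--             stats[ch] = (i, i, 1)
--         else:
--             f, _, cnt = rec
--             stats[ch] = (f, i, cnt + 1)
--     lonely = sorted(ch for ch, (f, last, cnt) in stats.items() if last - f + 1 != cnt)
--     return "".join(lonely) if lonely else "N"
-- ===== Notes on version B (the rewrite author's own statement) =====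
-- stated objective: alternative
-- what changed: Replaces A's run/chunk counting (compare each char with the previous one, count runs per letter, keep letters with >1 run) by a single pass storing (first_index, last_index, count) per character and testing the positional span against the frequency: a letter is lonely iff last-first+1 != count.
import Mathlib
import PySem

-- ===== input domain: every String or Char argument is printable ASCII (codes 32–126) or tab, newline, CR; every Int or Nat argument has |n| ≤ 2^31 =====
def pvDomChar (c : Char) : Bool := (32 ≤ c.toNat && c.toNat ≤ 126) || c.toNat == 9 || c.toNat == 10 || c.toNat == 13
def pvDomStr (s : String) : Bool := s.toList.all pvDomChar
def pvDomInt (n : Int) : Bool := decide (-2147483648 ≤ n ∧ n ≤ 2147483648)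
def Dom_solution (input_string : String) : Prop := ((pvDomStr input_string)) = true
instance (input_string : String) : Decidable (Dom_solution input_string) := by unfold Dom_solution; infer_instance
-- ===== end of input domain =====

-- B replaces A's run counting (compare with the previous char) by a one-pass
-- first/last-index/count record per character and the span-vs-count test; alternative
-- decomposition of the same task, same asymptotic cost.

-- ===== PORT A =====
-- A's loop: 'before' starts as '' (equal to no 1-char string), ported as Option Char (none).
def solStepA (st : PySem.Dict Char Int × Option Char) (c : Char) : PySem.Dict Char Int × Option Char :=
  if st.2 = some c then st                       -- 'continue'
  else (st.1.modify c 0 (· + 1), some c)         -- counter[char] += 1; before = char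

def solution (input_string : String) : String :=
  let r := input_string.toList.foldl solStepA (PySem.Dict.empty, none)
  let answer := (r.1.items.filter (fun p => 1 < p.2)).map (·.1)
  if answer ≠ [] then
    -- answer.sort(); "".join(answer)  — join of one-char strings is String.ofList of the chars
    String.ofList (PySem.List.sorted answer (fun x => x) false)
  else "N"

-- ===== PORT B =====
def solStepB (e : PySem.Dict Char (Int × Int × Int)) (p : Int × Char) :
    PySem.Dict Char (Int × Int × Int) :=
  match e.get? p.2 with
  | none => e.insert p.2 (p.1, p.1, 1)
  | some (f, _, cnt) => e.insert p.2 (f, p.1, cnt + 1)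

def solution_alt (input_string : String) : String :=
  let e := (PySem.List.enumerate input_string.toList 0).foldl solStepB PySem.Dict.empty
  let lonely := PySem.List.sorted
      ((e.items.filter (fun p => p.2.2.1 - p.2.1 + 1 ≠ p.2.2.2)).map (·.1)) (fun x => x) false
  if lonely ≠ [] then String.ofList lonely else "N"

-- ===== PRECONDITION & SPEC =====
def Spec_solution (input_string : String) (out : String) : Prop := out = solution_alt input_string
instance (input_string : String) (out : String) : Decidable (Spec_solution input_string out) := by unfold Spec_solution; infer_instance

-- ===== CLAIM (what is proved, stated in full; the proofs are below) =====
def Claim_equal_solution : Prop := ∀ (input_string : String), Dom_solution input_string → Spec_solution input_string (solution input_string)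

-- ===== LEMMAS AND PROOFS =====

-- Joint invariant after processing a prefix of length n:
-- the two dicts have the same keys (in order), and for every recorded char,
-- A's run count is 1 exactly when B's span equals B's count.
def solInv (n : Int) (d : PySem.Dict Char Int) (before : Option Char)
    (e : PySem.Dict Char (Int × Int × Int)) : Prop :=
  d.keys = e.keys ∧ d.keys.Nodup ∧
  (∀ c, before = some c → ∃ f cnt, e.get? c = some (f, n - 1, cnt)) ∧
  (∀ c f lst cnt, e.get? c = some (f, lst, cnt) →
      f ≤ lst ∧ lst ≤ n - 1 ∧ (before ≠ some c → lst ≤ n - 2) ∧ 1 ≤ cnt ∧ cnt ≤ lst - f + 1 ∧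
      1 ≤ d.getD c 0 ∧ (d.getD c 0 = 1 ↔ lst - f + 1 = cnt))

lemma solInv_zero : solInv 0 PySem.Dict.empty none PySem.Dict.empty := by
  refine ⟨rfl, by simp [PySem.Dict.keys_empty], ?_, ?_⟩
  · intro c h; simp at h
  · intro c f lst cnt h; simp [PySem.Dict.get?_empty] at h

lemma stepB_some (e : PySem.Dict Char (Int × Int × Int)) (p : Int × Char) (f lst cnt : Int)
    (hv : e.get? p.2 = some (f, lst, cnt)) : solStepB e p = e.insert p.2 (f, p.1, cnt + 1) := by
  simp [solStepB, hv]

lemma stepB_none (e : PySem.Dict Char (Int × Int × Int)) (p : Int × Char)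
    (hv : e.get? p.2 = none) : solStepB e p = e.insert p.2 (p.1, p.1, 1) := by
  simp [solStepB, hv]

lemma solInv_step (n : Int) (d : PySem.Dict Char Int) (before : Option Char)
    (e : PySem.Dict Char (Int × Int × Int)) (c : Char) (h : solInv n d before e) :
    solInv (n + 1) (solStepA (d, before) c).1 (solStepA (d, before) c).2 (solStepB e (n, c)) := by
  obtain ⟨hk, hnd, h3, h4⟩ := h
  by_cases hbc : before = some c
  · -- repeated char: A skips, B extends last index and count
    obtain ⟨f, cnt, hv⟩ := h3 c hbc
    have hA : solStepA (d, before) c = (d, before) := by simp [solStepA, hbc]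
    rw [hA, stepB_some e (n, c) f (n - 1) cnt hv]
    have hcon : e.contains c = true := by
      rw [PySem.Dict.contains_eq_isSome_get?, hv]; rfl
    dsimp only
    refine ⟨hk.trans (PySem.Dict.keys_insert_of_contains e _ hcon).symm, hnd, ?_, ?_⟩
    · intro c' hc'
      rw [hbc] at hc'; cases hc'
      exact ⟨f, cnt + 1, by rw [PySem.Dict.get?_insert_self]; norm_num⟩
    · intro c' f' lst' cnt' hv'
      by_cases hcc : c' = c
      · subst hcc
        rw [PySem.Dict.get?_insert_self] at hv'
        simp only [Option.some.injEq, Prod.mk.injEq] at hv'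
        obtain ⟨hf, hl, hc2⟩ := hv'
        subst hf; subst hl; subst hc2
        obtain ⟨o1, o2, -, o4, o5, o6, o7⟩ := h4 c' f (n - 1) cnt hv
        refine ⟨by omega, by omega, fun hh => absurd hbc hh, by omega, by omega, o6, ?_⟩
        constructor
        · intro hh; have := o7.mp hh; omega
        · intro hh; exact o7.mpr (by omega)
      · rw [PySem.Dict.get?_insert_of_ne e _ hcc] at hv'
        obtain ⟨o1, o2, -, o4, o5, o6, o7⟩ := h4 c' f' lst' cnt' hv'
        exact ⟨o1, by omega, fun _ => by omega, o4, o5, o6, o7⟩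
  · -- new run for A; B either creates the record or re-opens it after a gap
    have hA : solStepA (d, before) c = (d.modify c 0 (· + 1), some c) := by
      simp [solStepA, hbc]
    cases hv : e.get? c with
    | none =>
      -- first occurrence of c
      rw [hA, stepB_none e (n, c) hv]
      have hconE : e.contains c = false := by
        rw [PySem.Dict.contains_eq_isSome_get?, hv]; rfl
      have hmemE : c ∉ e.keys := fun hm =>
        by rw [(PySem.Dict.contains_iff_mem_keys e c).mpr hm] at hconE; cases hconE
      have hconD : d.contains c = false := by
        by_cases hh : d.contains c = true
        · exact absurd (hk ▸ (PySem.Dict.contains_iff_mem_keys d c).mp hh) hmemE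
        · simpa using hh
      have hkeysD : (d.modify c 0 (· + 1)).keys = d.keys ++ [c] := by
        rw [PySem.Dict.keys_modify, PySem.Dict.keys_insert_of_not_contains d _ hconD]
      have hkeysE : (e.insert c (n, n, 1)).keys = e.keys ++ [c] :=
        PySem.Dict.keys_insert_of_not_contains e _ hconE
      dsimp only
      refine ⟨by rw [hkeysD, hkeysE, hk], ?_, ?_, ?_⟩
      · rw [hkeysD]
        simp only [List.nodup_append, List.nodup_singleton, true_and]
        refine ⟨hnd, ?_⟩
        intro a ha b hb
        rw [List.mem_singleton] at hb
        subst hb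
        intro heq
        rw [heq] at ha
        exact hmemE (hk ▸ ha)
      · intro c' hc'; cases hc'
        exact ⟨n, 1, by rw [PySem.Dict.get?_insert_self]; norm_num⟩
      · intro c' f' lst' cnt' hv'
        by_cases hcc : c' = c
        · subst hcc
          rw [PySem.Dict.get?_insert_self] at hv'
          simp only [Option.some.injEq, Prod.mk.injEq] at hv'
          obtain ⟨hf, hl, hc2⟩ := hv'
          subst hf; subst hl; subst hc2
          have hgd : (d.modify c' 0 (· + 1)).getD c' 0 = 1 := by
            rw [PySem.Dict.getD_modify_self, PySem.Dict.getD_of_not_contains d _ hconD]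
            norm_num
          refine ⟨le_refl _, by omega, fun hh => absurd rfl hh, by omega, by omega, by omega, ?_⟩
          constructor <;> intro <;> omega
        · rw [PySem.Dict.get?_insert_of_ne e _ hcc] at hv'
          rw [PySem.Dict.getD_modify_of_ne d 0 _ hcc]
          obtain ⟨p1, p2, p3, p4, p5, p6, p7⟩ := h4 c' f' lst' cnt' hv'
          exact ⟨p1, by omega, fun _ => by omega, p4, p5, p6, p7⟩
    | some v =>
      obtain ⟨f, lst, cnt⟩ := v
      rw [hA, stepB_some e (n, c) f lst cnt hv]
      have hcon : e.contains c = true := by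
        rw [PySem.Dict.contains_eq_isSome_get?, hv]; rfl
      have hconD : d.contains c = true :=
        (PySem.Dict.contains_iff_mem_keys d c).mpr (hk ▸ (PySem.Dict.contains_iff_mem_keys e c).mp hcon)
      obtain ⟨o1, o2, o3, o4, o5, o6, o7⟩ := h4 c f lst cnt hv
      have hlst2 : lst ≤ n - 2 := o3 hbc
      have hkeysD : (d.modify c 0 (· + 1)).keys = d.keys := by
        rw [PySem.Dict.keys_modify, PySem.Dict.keys_insert_of_contains d _ hconD]
      dsimp only
      refine ⟨by rw [hkeysD, hk, PySem.Dict.keys_insert_of_contains e _ hcon],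
        by rw [hkeysD]; exact hnd, ?_, ?_⟩
      · intro c' hc'; cases hc'
        exact ⟨f, cnt + 1, by rw [PySem.Dict.get?_insert_self]; norm_num⟩
      · intro c' f' lst' cnt' hv'
        by_cases hcc : c' = c
        · subst hcc
          rw [PySem.Dict.get?_insert_self] at hv'
          simp only [Option.some.injEq, Prod.mk.injEq] at hv'
          obtain ⟨hf, hl, hc2⟩ := hv'
          subst hf; subst hl; subst hc2
          have hgd : (d.modify c' 0 (· + 1)).getD c' 0 = d.getD c' 0 + 1 :=
            PySem.Dict.getD_modify_self d c' 0 _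
          refine ⟨by omega, by omega, fun hh => absurd rfl hh, by omega, by omega, by omega, ?_⟩
          constructor <;> intro hh <;> omega
        · rw [PySem.Dict.get?_insert_of_ne e _ hcc] at hv'
          rw [PySem.Dict.getD_modify_of_ne d 0 _ hcc]
          obtain ⟨p1, p2, p3, p4, p5, p6, p7⟩ := h4 c' f' lst' cnt' hv'
          exact ⟨p1, by omega, fun _ => by omega, p4, p5, p6, p7⟩

lemma solInv_fold (l : List Char) : ∀ (n : Int) (d : PySem.Dict Char Int)
    (before : Option Char) (e : PySem.Dict Char (Int × Int × Int)), solInv n d before e →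
    solInv (n + l.length) (l.foldl solStepA (d, before)).1 (l.foldl solStepA (d, before)).2
      ((PySem.List.enumerate l n).foldl solStepB e) := by
  induction l with
  | nil => intro n d before e h; simpa [PySem.List.enumerate_nil] using h
  | cons c rest ih =>
    intro n d before e h
    have h1 := solInv_step n d before e c h
    have h2 := ih (n + 1) _ _ _ h1
    rw [PySem.List.enumerate_cons]
    simp only [List.foldl_cons, List.length_cons]
    have : n + 1 + (rest.length : Int) = n + ((rest.length : Int) + 1) := by ring
    rw [this] at h2
    convert h2 using 2

-- The two filtered key lists coincide.
lemma answer_eq (n : Int) (d : PySem.Dict Char Int) (before : Option Char)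
    (e : PySem.Dict Char (Int × Int × Int)) (h : solInv n d before e) :
    (d.items.filter (fun p => 1 < p.2)).map (·.1)
      = (e.items.filter (fun p => p.2.2.1 - p.2.1 + 1 ≠ p.2.2.2)).map (·.1) := by
  obtain ⟨hk, hnd, -, h4⟩ := h
  have hnd' : e.keys.Nodup := hk ▸ hnd
  rw [PySem.Dict.items_eq_map_keys d hnd 0, PySem.Dict.items_eq_map_keys e hnd' (0,0,0), hk]
  rw [List.filter_map, List.filter_map, List.map_map, List.map_map]
  simp only [Function.comp_def]
  rw [List.map_id', List.map_id']
  apply List.filter_congr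
  intro k hkmem
  have hc : e.contains k = true := (PySem.Dict.contains_iff_mem_keys e k).mpr hkmem
  have hne : e.get? k ≠ none := by
    rw [PySem.Dict.contains_eq_isSome_get?] at hc
    intro hn; rw [hn] at hc; simp at hc
  cases hv : e.get? k with
  | none => exact absurd hv hne
  | some v =>
    obtain ⟨f, lst, cnt⟩ := v
    obtain ⟨-, -, -, -, -, h1, h2⟩ := h4 k f lst cnt hv
    have hgd : e.getD k (0,0,0) = (f, lst, cnt) := by
      rw [PySem.Dict.getD_eq_get?_getD, hv]; rfl
    rw [hgd]
    simp only [decide_eq_decide]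
    by_cases hc : lst - f + 1 = cnt
    · have := h2.mpr hc; simp [hc]; omega
    · have : d.getD k 0 ≠ 1 := fun hh => hc (h2.mp hh)
      simp [hc]; omega

lemma sol_finish (ans : List Char) :
    (if ans ≠ [] then String.ofList (PySem.List.sorted ans (fun x => x) false) else "N")
      = (if PySem.List.sorted ans (fun x => x) false ≠ [] then
          String.ofList (PySem.List.sorted ans (fun x => x) false) else "N") := by
  by_cases h : ans = [] <;> simp [h, PySem.List.sorted_eq_nil_iff]

-- ===== VERDICT (by name: the statement is the Claim_ definition above) =====
theorem solution_spec : Claim_equal_solution := by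
  intro s _
  have h := solInv_fold s.toList 0 PySem.Dict.empty none PySem.Dict.empty solInv_zero
  have heq := answer_eq _ _ _ _ h
  unfold Spec_solution solution solution_alt
  simp only [heq]
  exact sol_finish _
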